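-- pv_equiv track=rewrite | github.com/jesmine0820/ielts-listening-question-generator | services/question_generator.py | number_ranges
-- ===== SOURCE A (Python) =====
-- def number_ranges(counts, section_num):
--     start = (section_num - 1) * 10 + 1
--     ranges = {}
--     cur = start
--     for t, c in counts.items():
--         ranges[t] = f"{cur}-{cur+c-1}"
--         cur += c
--     return ranges
-- ===== SOURCE B (Python) =====
-- def number_ranges(counts, section_num):
--     base = (section_num - 1) * 10 + 1
--     prefix = [0]
--     s = 0
--     for c in counts.values():
--         s += c
--         prefix.append(s)
--     return {t: f"{base + p}-{base + q - 1}"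
--             for t, (p, q) in zip(counts, zip(prefix, prefix[1:]))}
-- ===== Notes on version B (the rewrite author's own statement) =====
-- stated objective: alternative
-- what changed: A advances a running cursor while writing each range; B first builds the full prefix-sum table of the counts, then produces each type's range from consecutive prefix entries via zip, with no cursor in the output pass.
import Mathlib
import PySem

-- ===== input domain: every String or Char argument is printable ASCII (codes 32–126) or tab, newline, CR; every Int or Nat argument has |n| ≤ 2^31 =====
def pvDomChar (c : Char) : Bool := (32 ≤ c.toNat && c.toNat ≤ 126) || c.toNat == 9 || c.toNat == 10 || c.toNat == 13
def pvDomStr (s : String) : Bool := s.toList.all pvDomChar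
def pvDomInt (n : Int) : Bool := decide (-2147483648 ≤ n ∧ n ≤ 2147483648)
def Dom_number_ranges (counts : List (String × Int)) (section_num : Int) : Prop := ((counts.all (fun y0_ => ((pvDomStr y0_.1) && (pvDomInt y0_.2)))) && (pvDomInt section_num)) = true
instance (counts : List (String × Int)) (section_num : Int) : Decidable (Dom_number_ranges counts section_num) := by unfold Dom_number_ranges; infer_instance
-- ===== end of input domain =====

-- B replaces A's running-cursor pass by a precomputed pref-sum table zipped against the types (alternative decomposition, same cost).


-- ===== PORT A =====
-- for t, c in counts.items(): ranges[t] = f"{cur}-{cur+c-1}"; cur += c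
def number_ranges (counts : List (String × Int)) (section_num : Int) : List (String × String) :=
  let start := (section_num - 1) * 10 + 1
  let st := counts.foldl
    (fun (st : PySem.Dict String String × Int) tc =>
      (st.1.insert tc.1 (PySem.Int.toStr st.2 ++ "-" ++ PySem.Int.toStr (st.2 + tc.2 - 1)),
       st.2 + tc.2))
    (PySem.Dict.empty, start)
  st.1.items

-- ===== PORT B =====
-- prefix = [0]; s = 0; for c: s += c; pref.append(s)
-- {t: f"{base+p}-{base+q-1}" for t, (p, q) in zip(counts, zip(prefix, prefix[1:]))}
def number_ranges_alt (counts : List (String × Int)) (section_num : Int) : List (String × String) :=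
  let base := (section_num - 1) * 10 + 1
  let pr := counts.foldl
    (fun (st : List Int × Int) tc => (st.1 ++ [st.2 + tc.2], st.2 + tc.2)) ([0], 0)
  let pref := pr.1
  let d := ((counts.map Prod.fst).zip (pref.zip (PySem.List.slice pref (some 1) none))).foldl
    (fun (d : PySem.Dict String String) tp =>
      d.insert tp.1 (PySem.Int.toStr (base + tp.2.1) ++ "-" ++ PySem.Int.toStr (base + tp.2.2 - 1)))
    PySem.Dict.empty
  d.items

-- ===== PRECONDITION & SPEC =====
def Spec_number_ranges (counts : List (String × Int)) (section_num : Int) (out : List (String × String)) : Prop := out = number_ranges_alt counts section_num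
instance (counts : List (String × Int)) (section_num : Int) (out : List (String × String)) : Decidable (Spec_number_ranges counts section_num out) := by unfold Spec_number_ranges; infer_instance

-- ===== CLAIM (what is proved, stated in full; the proofs are below) =====
def Claim_equal_number_ranges : Prop := ∀ (counts : List (String × Int)) (section_num : Int), Dom_number_ranges counts section_num → Spec_number_ranges counts section_num (number_ranges counts section_num)

-- ===== LEMMAS AND PROOFS =====

/-- The list of partial sums of the counts, starting after the first count. -/
def pvPrefs (s : Int) : List (String × Int) → List Int
  | [] => []
  | (_, c) :: r => (s + c) :: pvPrefs (s + c) r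

/-- B's first loop builds `s :: pvPrefs s l` (as appended to `acc`). -/
theorem pvPrefFold (l : List (String × Int)) :
    ∀ (acc : List Int) (s : Int),
      (l.foldl (fun (st : List Int × Int) tc => (st.1 ++ [st.2 + tc.2], st.2 + tc.2)) (acc, s)).1
        = acc ++ pvPrefs s l := by
  induction l with
  | nil => intro acc s; simp [pvPrefs]
  | cons tc r ih =>
      intro acc s
      simp only [List.foldl_cons, pvPrefs]
      rw [ih (acc ++ [s + tc.2]) (s + tc.2)]
      simp

/-- Core agreement: A's cursor fold equals B's insert fold over the zipped pref table. -/
theorem pvMain (l : List (String × Int)) :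
    ∀ (d : PySem.Dict String String) (s base : Int),
      (l.foldl
        (fun (st : PySem.Dict String String × Int) tc =>
          (st.1.insert tc.1 (PySem.Int.toStr st.2 ++ "-" ++ PySem.Int.toStr (st.2 + tc.2 - 1)),
           st.2 + tc.2)) (d, base + s)).1
      = ((l.map Prod.fst).zip ((s :: pvPrefs s l).zip (pvPrefs s l))).foldl
          (fun (d : PySem.Dict String String) tp =>
            d.insert tp.1 (PySem.Int.toStr (base + tp.2.1) ++ "-" ++
              PySem.Int.toStr (base + tp.2.2 - 1))) d := by
  induction l with
  | nil => intro d s base; simp [pvPrefs]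
  | cons tc r ih =>
      intro d s base
      simp only [List.foldl_cons, pvPrefs, List.map_cons, List.zip_cons_cons]
      have h1 : base + s + tc.2 = base + (s + tc.2) := by ring
      have h2 : base + s + tc.2 - 1 = base + (s + tc.2) - 1 := by ring
      rw [h2, h1, ih]

-- ===== VERDICT (by name: the statement is the Claim_ definition above) =====
theorem number_ranges_spec : Claim_equal_number_ranges := by
  intro counts section_num _
  show number_ranges counts section_num = number_ranges_alt counts section_num
  have hp : (counts.foldl (fun (st : List Int × Int) tc => (st.1 ++ [st.2 + tc.2], st.2 + tc.2)) ([0], 0)).1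
      = 0 :: pvPrefs 0 counts := by simpa using pvPrefFold counts [0] 0
  have hm := pvMain counts PySem.Dict.empty 0 ((section_num - 1) * 10 + 1)
  simp only [add_zero] at hm
  simp only [number_ranges, number_ranges_alt, hp, PySem.List.slice_from_one, List.tail_cons]
  rw [hm]
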